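-- pv_equiv track=rewrite | github.com/mizzreecie808/CIS141-practice-problems | pynative_practice/string/exercise_04.py | lower_first
-- ===== SOURCE A (Python) =====
-- def lower_first(s1):
--     original = list(s1)
--     lower = []
--     upper = []
--     for char in original:
--         if char.islower():
--             lower.append(char)
--         else:
--             upper.append(char)
--
--     sorted = "".join(lower + upper)
--     return sorted
-- ===== SOURCE B (Python) =====
-- def lower_first(s1):
--     return "".join(sorted(s1, key=lambda c: not c.islower()))
-- ===== Notes on version B (the rewrite author's own statement) =====
-- stated objective: idiomatic
-- what changed: Replaced the explicit two-bucket partition loop with a single stable sort keyed on a boolean that is false for lowercase characters, letting sort stability produce the lowercase-first grouping.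
import Mathlib
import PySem

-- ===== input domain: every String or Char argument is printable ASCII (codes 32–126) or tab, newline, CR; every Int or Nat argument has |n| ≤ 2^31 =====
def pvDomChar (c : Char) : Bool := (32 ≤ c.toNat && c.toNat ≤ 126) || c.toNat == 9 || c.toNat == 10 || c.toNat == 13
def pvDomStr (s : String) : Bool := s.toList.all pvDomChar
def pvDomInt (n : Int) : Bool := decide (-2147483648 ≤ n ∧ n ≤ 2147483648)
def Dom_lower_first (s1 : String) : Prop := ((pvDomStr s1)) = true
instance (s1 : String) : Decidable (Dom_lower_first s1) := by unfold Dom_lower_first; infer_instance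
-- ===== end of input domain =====

-- B replaces A's explicit two-bucket partition loop by one stable sort keyed on "not islower" (idiomatic; same result).


-- ===== PORT A =====
def lower_first (s1 : String) : String :=
  let original := s1.toList
  let lu := original.foldl
    (fun (acc : List Char × List Char) c =>
      if PySem.Chars.islower c then (acc.1 ++ [c], acc.2) else (acc.1, acc.2 ++ [c]))
    ([], [])
  String.mk (lu.1 ++ lu.2)

-- ===== PORT B =====
def lower_first_alt (s1 : String) : String :=
  String.mk (PySem.List.sorted s1.toList (fun c => !PySem.Chars.islower c) false)

-- ===== PRECONDITION & SPEC =====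
def Spec_lower_first (s1 : String) (out : String) : Prop := out = lower_first_alt s1
instance (s1 : String) (out : String) : Decidable (Spec_lower_first s1 out) := by unfold Spec_lower_first; infer_instance

-- ===== CLAIM (what is proved, stated in full; the proofs are below) =====
def Claim_equal_lower_first : Prop := ∀ (s1 : String), Dom_lower_first s1 → Spec_lower_first s1 (lower_first s1)

-- ===== LEMMAS AND PROOFS =====

-- A's partition loop computes the two filters.
theorem lf_foldA (l L U : List Char) :
    l.foldl (fun (acc : List Char × List Char) c =>
      if PySem.Chars.islower c then (acc.1 ++ [c], acc.2) else (acc.1, acc.2 ++ [c])) (L, U)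
    = (L ++ l.filter (fun c => PySem.Chars.islower c),
       U ++ l.filter (fun c => !PySem.Chars.islower c)) := by
  induction l generalizing L U with
  | nil => simp
  | cons c t ih =>
    by_cases h : PySem.Chars.islower c = true <;>
      simp [List.foldl_cons, h, ih, List.append_assoc]

-- insertBy skips a prefix it never goes before, then inserts before the first element it does.
theorem lf_insertBy_mid (before : Char → Char → Bool) (x : Char) (L U : List Char)
    (hL : ∀ y ∈ L, before x y = false) (hU : ∀ y ∈ U, before x y = true) :
    PySem.List.insertBy before x (L ++ U) = L ++ x :: U := by
  induction L with
  | nil =>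
    cases U with
    | nil => simp [PySem.List.insertBy]
    | cons u us => simp [PySem.List.insertBy, hU u (by simp)]
  | cons a as ih =>
    have ha : before x a = false := hL a (by simp)
    simp [PySem.List.insertBy, ha, ih (fun y hy => hL y (by simp [hy]))]

-- The stable insertion-sort fold with the boolean key keeps lowercase chars grouped before the rest.
theorem lf_foldB (l L U : List Char)
    (hL : ∀ c ∈ L, PySem.Chars.islower c = true)
    (hU : ∀ c ∈ U, PySem.Chars.islower c = false) :
    l.foldl (fun acc x =>
        PySem.List.insertBy (fun a b => decide ((!PySem.Chars.islower a) < (!PySem.Chars.islower b))) x acc)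
      (L ++ U)
    = (L ++ l.filter (fun c => PySem.Chars.islower c))
      ++ (U ++ l.filter (fun c => !PySem.Chars.islower c)) := by
  induction l generalizing L U with
  | nil => simp
  | cons c t ih =>
    by_cases h : PySem.Chars.islower c = true
    · have hins : PySem.List.insertBy
          (fun a b => decide ((!PySem.Chars.islower a) < (!PySem.Chars.islower b))) c (L ++ U)
          = L ++ c :: U := by
        refine lf_insertBy_mid _ _ _ _ (fun y hy => ?_) (fun y hy => ?_)
        · simp [h, hL y hy]
        · simp [h, hU y hy]
      have hL' : ∀ x ∈ L ++ [c], PySem.Chars.islower x = true := by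
        intro x hx
        rcases List.mem_append.1 hx with h1 | h1
        · exact hL x h1
        · simp at h1; subst h1; exact h
      have hrec := ih (L ++ [c]) U hL' hU
      simp only [List.foldl_cons, hins]
      rw [show L ++ c :: U = (L ++ [c]) ++ U by simp, hrec]
      simp [h, List.append_assoc]
    · have hb : PySem.Chars.islower c = false := by simpa using h
      have hins : PySem.List.insertBy
          (fun a b => decide ((!PySem.Chars.islower a) < (!PySem.Chars.islower b))) c (L ++ U)
          = (L ++ U) ++ [c] := by
        refine PySem.List.insertBy_of_forall_not_before _ _ _ (fun y hy => ?_)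
        simp [hb]
      have hU' : ∀ x ∈ U ++ [c], PySem.Chars.islower x = false := by
        intro x hx
        rcases List.mem_append.1 hx with h1 | h1
        · exact hU x h1
        · simp at h1; subst h1; exact hb
      have hrec := ih L (U ++ [c]) hL hU'
      simp only [List.foldl_cons, hins]
      rw [show (L ++ U) ++ [c] = L ++ (U ++ [c]) by simp, hrec]
      simp [hb, List.append_assoc]

-- ===== VERDICT (by name: the statement is the Claim_ definition above) =====
theorem lower_first_spec : Claim_equal_lower_first := by
  intro s1 _
  unfold Spec_lower_first lower_first lower_first_alt
  rw [PySem.List.sorted_eq_foldl_insertBy]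
  have hb := lf_foldB s1.toList [] [] (by simp) (by simp)
  simp only [List.nil_append] at hb
  simp [lf_foldA, hb]
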